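-- pv_equiv track=rewrite | github.com/Larissa-11/DNA-DSP | djangoProject/app01/sequence_reconstruction/lsh/LSH_Clustering.py | DNA_kmer_index
-- ===== SOURCE A (Python) =====
-- def DNA_kmer_index(seq, k=3):  # The default step size is 1
--     kmer = []
--     for ell in range(len(seq) - k + 1):
--         nstr = seq[ell:ell + k]
--         index = 0
--         for j, c in enumerate(nstr):
--             if c == 'A':
--                 i = 0
--             elif c == 'C':
--                 i = 1
--             elif c == 'G':
--                 i = 2
--             elif c == 'T':
--                 i = 3
--             else:
--                 index = -1
--                 break
--             index += i * (4 ** j)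
--         kmer += [index]
--     return kmer
-- ===== SOURCE B (Python) =====
-- def DNA_kmer_index(seq, k=3):  # The default step size is 1
--     # Rolling base-4 hash: O(len(seq)) instead of O(len(seq)*k).
--     n = len(seq)
--     if k < 1 or n - k + 1 <= 0:
--         return []
--     digits = [{'A': 0, 'C': 1, 'G': 2, 'T': 3}.get(c, -1) for c in seq]
--     hi = 4 ** (k - 1)
--     h = 0
--     last_bad = -1
--     for i in range(k):
--         if digits[i] < 0:
--             last_bad = i
--         else:
--             h += digits[i] * 4 ** i
--     kmer = [-1 if last_bad >= 0 else h]
--     for ell in range(1, n - k + 1):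
--         d_in = digits[ell + k - 1]
--         if d_in < 0:
--             last_bad = ell + k - 1
--             d_in = 0
--         h = (h - max(digits[ell - 1], 0)) // 4 + d_in * hi
--         kmer.append(-1 if last_bad >= ell else h)
--     return kmer
-- ===== Notes on version B (the rewrite author's own statement) =====
-- stated objective: faster
-- what changed: Replaces A's per-window rescan (slice each window, re-classify every character, re-raise 4**j) with a one-pass rolling base-4 hash over a precomputed digit array, updating the window index in O(1) and tracking the last invalid character's position to emit -1.
-- outside the precondition, e.g. on DNA_kmer_index('ACGT', 0): A returns [0, 0, 0, 0, 0], B returns []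
import Mathlib
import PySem

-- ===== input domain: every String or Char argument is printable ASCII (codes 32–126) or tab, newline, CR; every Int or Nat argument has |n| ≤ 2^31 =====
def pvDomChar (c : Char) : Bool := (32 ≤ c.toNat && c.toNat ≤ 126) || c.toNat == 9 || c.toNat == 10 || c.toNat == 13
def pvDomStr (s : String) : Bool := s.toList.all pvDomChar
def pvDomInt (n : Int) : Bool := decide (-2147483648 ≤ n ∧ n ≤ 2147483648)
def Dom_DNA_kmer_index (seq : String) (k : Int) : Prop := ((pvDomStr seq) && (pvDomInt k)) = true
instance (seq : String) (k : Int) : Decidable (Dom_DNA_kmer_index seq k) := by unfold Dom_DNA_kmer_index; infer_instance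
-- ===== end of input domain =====

-- B replaces A's per-window rescan with a rolling base-4 hash plus a last-invalid-index tracker,
-- updating each window in O(1) (objective: faster).

-- ===== PORT A =====
-- inner loop 'for j, c in enumerate(nstr)' with its break ('index = -1; break')
def pvInnerA : List Char → Nat → Int → Int
  | [], _, index => index
  | c :: rest, j, index =>
    if c = 'A' then pvInnerA rest (j + 1) (index + 0 * (4 : Int) ^ j)
    else if c = 'C' then pvInnerA rest (j + 1) (index + 1 * (4 : Int) ^ j)
    else if c = 'G' then pvInnerA rest (j + 1) (index + 2 * (4 : Int) ^ j)
    else if c = 'T' then pvInnerA rest (j + 1) (index + 3 * (4 : Int) ^ j)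
    else -1

def DNA_kmer_index (seq : String) (k : Int) : List Int :=
  let cs := seq.toList
  (PySem.List.pyRange 0 ((cs.length : Int) - k + 1) 1).foldl
    (fun kmer ell =>
      let nstr := PySem.List.slice cs (some ell) (some (ell + k))
      kmer ++ [pvInnerA nstr 0 0]) []

-- ===== PORT B =====
-- {'A':0,'C':1,'G':2,'T':3}.get(c, -1)
def pvDigit (c : Char) : Int :=
  if c = 'A' then 0 else if c = 'C' then 1 else if c = 'G' then 2 else if c = 'T' then 3 else -1

def DNA_kmer_index_alt (seq : String) (k : Int) : List Int :=
  let cs := seq.toList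
  let n : Int := cs.length
  if k < 1 ∨ n - k + 1 ≤ 0 then []
  else
    let digits := cs.map pvDigit
    let hi : Int := 4 ^ (k - 1).toNat
    let st0 : Int × Int :=
      (PySem.List.pyRange 0 k 1).foldl
        (fun st i =>
          if PySem.List.pyGetD digits i 0 < 0 then (st.1, i)
          else (st.1 + PySem.List.pyGetD digits i 0 * 4 ^ i.toNat, st.2))
        (0, -1)
    let kmer0 : List Int := [if 0 ≤ st0.2 then -1 else st0.1]
    let fin : Int × Int × List Int :=
      (PySem.List.pyRange 1 (n - k + 1) 1).foldl
        (fun q ell =>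
          let dIn0 := PySem.List.pyGetD digits (ell + k - 1) 0
          let lb : Int := if dIn0 < 0 then ell + k - 1 else q.2.1
          let dIn : Int := if dIn0 < 0 then 0 else dIn0
          let h := PySem.Int.floordiv (q.1 - max (PySem.List.pyGetD digits (ell - 1) 0) 0) 4
                     + dIn * hi
          (h, lb, q.2.2 ++ [if ell ≤ lb then -1 else h]))
        (st0.1, st0.2, kmer0)
    fin.2.2

-- ===== PRECONDITION & SPEC =====
-- Pre_ excludes k ≤ 0, a meaningless window length: A's slices seq[ell:ell+k] then hit Python's
-- negative-stop wraparound and return accidental window values, while B returns [].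
def Pre_DNA_kmer_index (seq : String) (k : Int) : Prop := 1 ≤ k
instance (seq : String) (k : Int) : Decidable (Pre_DNA_kmer_index seq k) := by
  unfold Pre_DNA_kmer_index; infer_instance

def pvWitness_DNA_kmer_index : String × Int := ("ACGT", 2)

def Spec_DNA_kmer_index (seq : String) (k : Int) (out : List Int) : Prop := out = DNA_kmer_index_alt seq k
instance (seq : String) (k : Int) (out : List Int) : Decidable (Spec_DNA_kmer_index seq k out) := by unfold Spec_DNA_kmer_index; infer_instance

-- ===== CLAIM (what is proved, stated in full; the proofs are below) =====
def Claim_equal_DNA_kmer_index : Prop := ∀ (seq : String) (k : Int), Dom_DNA_kmer_index seq k → Pre_DNA_kmer_index seq k → Spec_DNA_kmer_index seq k (DNA_kmer_index seq k)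

-- ===== LEMMAS AND PROOFS =====

-- little-endian base-4 value of a digit list
def pvWsum : List Int → Int
  | [] => 0
  | d :: r => d + 4 * pvWsum r

-- digits clamped at 0 (what the rolling hash actually carries)
def pvCl (w : List Int) : List Int := w.map (fun d => max d 0)

-- the k-mer value of one window of digits
def pvWval (w : List Int) : Int := if w.any (fun d => decide (d < 0)) then -1 else pvWsum w

-- the window of kn digits starting at ell, in canonical map-over-range form
def pvWinR (ds : List Int) (kn ell : Nat) : List Int :=
  (List.range kn).map (fun j => ds.getD (ell + j) 0)

def pvOut (ds : List Int) (kn ell : Nat) : Int := pvWval (pvWinR ds kn ell)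

-- lb is -1 and no invalid digit below u, or lb is the largest invalid index below u
def pvLB (ds : List Int) (u : Nat) (lb : Int) : Prop :=
  (lb = -1 ∧ ∀ i, i < u → 0 ≤ ds.getD i 0) ∨
  (∃ i : Nat, lb = (i : Int) ∧ i < u ∧ ds.getD i 0 < 0 ∧ ∀ j, i < j → j < u → 0 ≤ ds.getD j 0)

-- the Nat-indexed form of port B's initial-window loop body
def pvInitN (ds : List Int) (st : Int × Int) (i : Nat) : Int × Int :=
  if ds.getD i 0 < 0 then (st.1, (i : Int))
  else (st.1 + ds.getD i 0 * 4 ^ i, st.2)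

-- the Nat-indexed form of port B's rolling loop body
def pvStepN (ds : List Int) (kn : Nat) (q : Int × Int × List Int) (ell : Nat) : Int × Int × List Int :=
  let dIn0 := ds.getD (ell + kn - 1) 0
  let lb : Int := if dIn0 < 0 then ((ell + kn - 1 : Nat) : Int) else q.2.1
  let dIn : Int := if dIn0 < 0 then 0 else dIn0
  let h := PySem.Int.floordiv (q.1 - max (ds.getD (ell - 1) 0) 0) 4 + dIn * 4 ^ (kn - 1)
  (h, lb, q.2.2 ++ [if (ell : Int) ≤ lb then -1 else h])

theorem pvWsum_append (xs : List Int) (d : Int) :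
    pvWsum (xs ++ [d]) = pvWsum xs + d * 4 ^ xs.length := by
  induction xs with
  | nil => simp [pvWsum]
  | cons a t ih => simp [pvWsum, ih]; ring

theorem pvCl_cons (d : Int) (w : List Int) : pvCl (d :: w) = max d 0 :: pvCl w := rfl

theorem pvCl_append (w : List Int) (d : Int) : pvCl (w ++ [d]) = pvCl w ++ [max d 0] := by
  simp [pvCl]

theorem pvCl_length (w : List Int) : (pvCl w).length = w.length := by simp [pvCl]

theorem pvCl_eq_self (w : List Int) (h : ∀ d ∈ w, 0 ≤ d) : pvCl w = w := by
  unfold pvCl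
  conv_rhs => rw [← List.map_id w]
  exact List.map_congr_left (fun d hd => by simpa using max_eq_left (h d hd))

theorem pvWinR_length (ds : List Int) (kn ell : Nat) : (pvWinR ds kn ell).length = kn := by
  simp [pvWinR]

theorem pvWin_eq_pvWinR (ds : List Int) (kn ell : Nat) (h : ell + kn ≤ ds.length) :
    (ds.drop ell).take kn = pvWinR ds kn ell := by
  apply List.ext_getElem
  · simp [pvWinR]; omega
  · intro j h1 h2
    have hj : j < kn := by simpa [pvWinR] using h2
    have hjl : ell + j < ds.length := by omega
    simp [pvWinR, List.getElem_take, List.getElem_drop, List.getD_eq_getElem?_getD,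
      List.getElem?_eq_getElem hjl]

theorem pvWinR_cons (ds : List Int) (kn ell : Nat) (hk : 1 ≤ kn) :
    pvWinR ds kn ell = ds.getD ell 0 :: pvWinR ds (kn - 1) (ell + 1) := by
  obtain ⟨K, rfl⟩ : ∃ K, kn = K + 1 := ⟨kn - 1, by omega⟩
  simp only [pvWinR, List.range_succ_eq_map, List.map_map, Nat.add_sub_cancel, List.map_cons,
    Nat.add_zero]
  refine congrArg _ (List.map_congr_left (fun j _ => ?_))
  simp only [Function.comp_apply]; congr 1; omega

theorem pvWinR_snoc (ds : List Int) (kn ell : Nat) (hk : 1 ≤ kn) :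
    pvWinR ds kn (ell + 1) = pvWinR ds (kn - 1) (ell + 1) ++ [ds.getD (ell + kn) 0] := by
  obtain ⟨K, rfl⟩ : ∃ K, kn = K + 1 := ⟨kn - 1, by omega⟩
  simp only [pvWinR, List.range_succ, Nat.add_sub_cancel, List.map_append, List.map_cons,
    List.map_nil, List.append_cancel_left_eq, List.cons.injEq, and_true]
  congr 1; omega

theorem pvInnerA_eq (cs : List Char) : ∀ (j : Nat) (acc : Int),
    pvInnerA cs j acc =
      if (cs.map pvDigit).any (fun d => decide (d < 0)) then -1
      else acc + 4 ^ j * pvWsum (cs.map pvDigit) := by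
  induction cs with
  | nil => intro j acc; simp [pvInnerA, pvWsum]
  | cons a t ih =>
    intro j acc
    by_cases hA : a = 'A'
    · subst hA; simp [pvInnerA, ih, pvDigit, pvWsum]
      split_ifs <;> ring
    · by_cases hC : a = 'C'
      · subst hC; simp [pvInnerA, ih, pvDigit, pvWsum]
        split_ifs <;> ring
      · by_cases hG : a = 'G'
        · subst hG; simp [pvInnerA, ih, pvDigit, pvWsum]
          split_ifs <;> ring
        · by_cases hT : a = 'T'
          · subst hT; simp [pvInnerA, ih, pvDigit, pvWsum]
            split_ifs <;> ring
          · simp [pvInnerA, hA, hC, hG, hT, pvDigit]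

theorem pvFloordiv4 (x : Int) : PySem.Int.floordiv (4 * x) 4 = x := by
  rw [PySem.Int.floordiv_eq_ediv_of_pos (by norm_num)]
  exact Int.mul_ediv_cancel_left x (by norm_num)

-- the emitted value is the spec value of the window
theorem pvWinR_grow (ds : List Int) (p ell : Nat) :
    pvWinR ds (p + 1) ell = pvWinR ds p ell ++ [ds.getD (ell + p) 0] := by
  simp [pvWinR, List.range_succ]

theorem pvAnyBad (ds : List Int) (kn ell : Nat) :
    (pvWinR ds kn ell).any (fun d => decide (d < 0)) = true ↔
      ∃ j, j < kn ∧ ds.getD (ell + j) 0 < 0 := by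
  simp [pvWinR, List.any_eq_true]

-- the emitted value is the spec value of the window
theorem pvOutEq (ds : List Int) (kn ell : Nat) (lb : Int)
    (hlb : pvLB ds (ell + kn) lb) :
    (if (ell : Int) ≤ lb then -1 else pvWsum (pvCl (pvWinR ds kn ell))) = pvOut ds kn ell := by
  unfold pvOut pvWval
  by_cases hb : (pvWinR ds kn ell).any (fun d => decide (d < 0)) = true
  · rw [if_pos hb]
    obtain ⟨j, hj, hneg⟩ := (pvAnyBad ds kn ell).1 hb
    have : (ell : Int) ≤ lb := by
      rcases hlb with ⟨rfl, hall⟩ | ⟨i, rfl, hiu, hineg, hmax⟩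
      · exact absurd (hall (ell + j) (by omega)) (by omega)
      · have : ell ≤ i := by
          by_contra hlt
          exact absurd (hmax (ell + j) (by omega) (by omega)) (by omega)
        exact_mod_cast this
    rw [if_pos this]
  · rw [if_neg hb]
    have hpos : ∀ d ∈ pvWinR ds kn ell, 0 ≤ d := by
      intro d hd
      by_contra hneg
      exact hb (List.any_eq_true.2 ⟨d, hd, by simpa using by omega⟩)
    have : ¬ ((ell : Int) ≤ lb) := by
      rcases hlb with ⟨rfl, _⟩ | ⟨i, rfl, hiu, hineg, hmax⟩
      · omega
      · have : ¬ ell ≤ i := by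
          intro hle
          have hmem : ds.getD i 0 ∈ pvWinR ds kn ell := by
            simp only [pvWinR, List.mem_map, List.mem_range]
            exact ⟨i - ell, by omega, by congr 1; omega⟩
          exact absurd (hpos _ hmem) (by omega)
        simpa using this
    rw [if_neg this, pvCl_eq_self _ hpos]

-- invariant of the initial-window loop
theorem pvInitInv (ds : List Int) (p : Nat) :
    ∃ lb, (List.range p).foldl (pvInitN ds) (0, -1)
        = (pvWsum (pvCl (pvWinR ds p 0)), lb) ∧ pvLB ds p lb := by
  induction p with
  | zero => exact ⟨-1, by simp [pvWinR, pvCl, pvWsum], Or.inl ⟨rfl, by omega⟩⟩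
  | succ p ih =>
    obtain ⟨lb, heq, hlb⟩ := ih
    rw [List.range_succ, List.foldl_append, heq]
    have hgrow : pvWsum (pvCl (pvWinR ds (p + 1) 0)) =
        pvWsum (pvCl (pvWinR ds p 0)) + max (ds.getD p 0) 0 * 4 ^ p := by
      rw [pvWinR_grow, pvCl_append, pvWsum_append, pvCl_length, pvWinR_length]
      simp
    by_cases hneg : ds.getD p 0 < 0
    · refine ⟨(p : Int), ?_, Or.inr ⟨p, rfl, by omega, hneg, by omega⟩⟩
      simp only [List.foldl_cons, List.foldl_nil, pvInitN, if_pos hneg, hgrow]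
      rw [max_eq_right (by omega)]
      simp
    · refine ⟨lb, ?_, ?_⟩
      · simp only [List.foldl_cons, List.foldl_nil, pvInitN, if_neg hneg, hgrow]
        rw [max_eq_left (by omega)]
      · rcases hlb with ⟨rfl, hall⟩ | ⟨i, rfl, hiu, hineg, hmax⟩
        · exact Or.inl ⟨rfl, fun i hi => by rcases Nat.lt_succ_iff_lt_or_eq.1 hi with h | rfl
                                            exacts [hall i h, by omega]⟩
        · exact Or.inr ⟨i, rfl, by omega, hineg,
            fun j h1 h2 => by rcases Nat.lt_succ_iff_lt_or_eq.1 h2 with h | rfl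
                              exacts [hmax j h1 h, by omega]⟩

-- one rolling step is correct
theorem pvStep_correct (ds : List Int) (kn e : Nat) (lb : Int) (acc : List Int)
    (hk : 1 ≤ kn) (hlb : pvLB ds (e + kn) lb) :
    ∃ lb', pvStepN ds kn (pvWsum (pvCl (pvWinR ds kn e)), lb, acc) (e + 1)
        = (pvWsum (pvCl (pvWinR ds kn (e + 1))), lb', acc ++ [pvOut ds kn (e + 1)])
      ∧ pvLB ds (e + 1 + kn) lb' := by
  have hidx : e + 1 + kn - 1 = e + kn := by omega
  have hidx1 : e + 1 - 1 = e := by omega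
  set dIn0 := ds.getD (e + kn) 0 with hdIn0
  set lb' : Int := if dIn0 < 0 then ((e + kn : Nat) : Int) else lb with hlb'
  have hLB' : pvLB ds (e + 1 + kn) lb' := by
    rw [hlb']
    by_cases hc : dIn0 < 0
    · rw [if_pos hc]
      exact Or.inr ⟨e + kn, rfl, by omega, hc, fun j h1 h2 => by omega⟩
    · rw [if_neg hc]
      have hc0 : 0 ≤ ds.getD (e + kn) 0 := Int.not_lt.mp hc
      rcases hlb with ⟨rfl, hall⟩ | ⟨i, rfl, hiu, hineg, hmax⟩
      · refine Or.inl ⟨rfl, fun i hi => ?_⟩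
        rcases Nat.lt_or_ge i (e + kn) with h | h
        · exact hall i h
        · have hie : i = e + kn := by omega
          rw [hie]; exact hc0
      · refine Or.inr ⟨i, rfl, by omega, hineg, fun j h1 h2 => ?_⟩
        rcases Nat.lt_or_ge j (e + kn) with h | h
        · exact hmax j h1 h
        · have hje : j = e + kn := by omega
          rw [hje]; exact hc0
  have hwin : pvWinR ds kn e = ds.getD e 0 :: pvWinR ds (kn - 1) (e + 1) := pvWinR_cons ds kn e hk
  have hwin' : pvWinR ds kn (e + 1) = pvWinR ds (kn - 1) (e + 1) ++ [dIn0] :=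
    pvWinR_snoc ds kn e hk
  have hsum : pvWsum (pvCl (pvWinR ds kn e)) =
      max (ds.getD e 0) 0 + 4 * pvWsum (pvCl (pvWinR ds (kn - 1) (e + 1))) := by
    rw [hwin, pvCl_cons, pvWsum]
  have hsum' : pvWsum (pvCl (pvWinR ds kn (e + 1))) =
      pvWsum (pvCl (pvWinR ds (kn - 1) (e + 1))) + max dIn0 0 * 4 ^ (kn - 1) := by
    rw [hwin', pvCl_append, pvWsum_append, pvCl_length, pvWinR_length]
  have hout := pvOutEq ds kn (e + 1) lb' (by simpa using hLB')
  refine ⟨lb', ?_, hLB'⟩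
  simp only [pvStepN, hidx, hidx1, ← hdIn0, ← hlb']
  have hdiv : PySem.Int.floordiv
      (pvWsum (pvCl (pvWinR ds kn e)) - max (ds.getD e 0) 0) 4
      = pvWsum (pvCl (pvWinR ds (kn - 1) (e + 1))) := by
    rw [hsum, add_sub_cancel_left, pvFloordiv4]
  have hh : PySem.Int.floordiv (pvWsum (pvCl (pvWinR ds kn e)) - max (ds.getD e 0) 0) 4
      + (if dIn0 < 0 then 0 else dIn0) * 4 ^ (kn - 1)
      = pvWsum (pvCl (pvWinR ds kn (e + 1))) := by
    rw [hdiv, hsum']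
    congr 1
    by_cases hc : dIn0 < 0
    · rw [if_pos hc, max_eq_right (by omega)]
    · rw [if_neg hc, max_eq_left (by omega)]
  rw [hh, hout]

-- invariant of the rolling loop
theorem pvRollInv (ds : List Int) (kn : Nat) (hk : 1 ≤ kn) :
    ∀ (p : Nat),
    ∀ (h0 lb0 : Int), h0 = pvWsum (pvCl (pvWinR ds kn 0)) → pvLB ds kn lb0 →
    ∃ lb, (List.range p).foldl (fun q t => pvStepN ds kn q (t + 1)) (h0, lb0, [pvOut ds kn 0])
        = (pvWsum (pvCl (pvWinR ds kn p)), lb, (List.range (p + 1)).map (pvOut ds kn))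
      ∧ pvLB ds (p + kn) lb := by
  intro p
  induction p with
  | zero =>
    intro h0 lb0 hh0 hlb0
    refine ⟨lb0, ?_, by simpa using hlb0⟩
    simp [hh0]
  | succ p ih =>
    intro h0 lb0 hh0 hlb0
    obtain ⟨lb, heq, hlb⟩ := ih h0 lb0 hh0 hlb0
    rw [List.range_succ, List.foldl_append, heq]
    obtain ⟨lb', hstep, hlb'⟩ := pvStep_correct ds kn p lb ((List.range (p + 1)).map (pvOut ds kn))
      hk (by simpa using hlb)
    refine ⟨lb', ?_, by simpa [Nat.add_comm, Nat.add_assoc, Nat.add_left_comm] using hlb'⟩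
    simp only [List.foldl_cons, List.foldl_nil, hstep]
    rw [List.range_succ (n := p + 1), List.map_append]
    rfl

-- rfl-characterizations of the two ports (zeta-expanded, with named loop bodies)
def pvBInit (ds : List Int) (st : Int × Int) (i : Int) : Int × Int :=
  if PySem.List.pyGetD ds i 0 < 0 then (st.1, i)
  else (st.1 + PySem.List.pyGetD ds i 0 * 4 ^ i.toNat, st.2)

def pvBStep (ds : List Int) (k : Int) (q : Int × Int × List Int) (ell : Int) :
    Int × Int × List Int :=
  let dIn0 := PySem.List.pyGetD ds (ell + k - 1) 0
  let lb : Int := if dIn0 < 0 then ell + k - 1 else q.2.1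
  let dIn : Int := if dIn0 < 0 then 0 else dIn0
  let h := PySem.Int.floordiv (q.1 - max (PySem.List.pyGetD ds (ell - 1) 0) 0) 4
             + dIn * 4 ^ (k - 1).toNat
  (h, lb, q.2.2 ++ [if ell ≤ lb then -1 else h])

theorem pvA_unfold (seq : String) (k : Int) :
    DNA_kmer_index seq k =
      (PySem.List.pyRange 0 ((seq.toList.length : Int) - k + 1) 1).foldl
        (fun kmer ell =>
          kmer ++ [pvInnerA (PySem.List.slice seq.toList (some ell) (some (ell + k))) 0 0])
        [] := rfl

theorem pvB_unfold (seq : String) (k : Int) :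
    DNA_kmer_index_alt seq k =
      if k < 1 ∨ (seq.toList.length : Int) - k + 1 ≤ 0 then []
      else
        (let st0 := (PySem.List.pyRange 0 k 1).foldl (pvBInit (seq.toList.map pvDigit)) (0, -1)
         ((PySem.List.pyRange 1 ((seq.toList.length : Int) - k + 1) 1).foldl
            (pvBStep (seq.toList.map pvDigit) k)
            (st0.1, st0.2, [if 0 ≤ st0.2 then -1 else st0.1])).2.2) := rfl

-- ===== VERDICT (by name: the statement is the Claim_ definition above) =====
theorem DNA_kmer_index_spec : Claim_equal_DNA_kmer_index := by
  intro seq k _ hpre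
  have hk1 : (1 : Int) ≤ k := hpre
  unfold Spec_DNA_kmer_index
  rw [pvA_unfold, pvB_unfold]
  set cs := seq.toList with hcs
  set ds := cs.map pvDigit with hds
  set kn := k.toNat with hkn
  have hkk : (kn : Int) = k := Int.toNat_of_nonneg (by omega)
  have hkn1 : 1 ≤ kn := by omega
  set n := cs.length with hn
  have hdslen : ds.length = n := by simp [hds, hn]
  by_cases hsmall : (n : Int) - k + 1 ≤ 0
  · rw [PySem.List.pyRange_one_eq_nil (by omega), if_pos (Or.inr hsmall)]
    rfl
  · rw [if_neg (by push Not; exact ⟨by omega, by omega⟩)]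
    have hknn : kn ≤ n := by omega
    set m := n - kn + 1 with hm
    have hm1 : 1 ≤ m := by omega
    have hmInt : (n : Int) - k + 1 = (m : Int) := by rw [← hkk]; omega
    -- ===== A side =====
    have hA : (PySem.List.pyRange 0 ((n : Int) - k + 1) 1).foldl
        (fun kmer ell =>
          kmer ++ [pvInnerA (PySem.List.slice cs (some ell) (some (ell + k))) 0 0]) []
        = (List.range m).map (pvOut ds kn) := by
      rw [hmInt, PySem.List.pyRange_one]
      simp only [Int.sub_zero, Int.toNat_natCast, zero_add]
      rw [List.foldl_map, PySem.List.foldl_append_singleton_eq_map, List.nil_append]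
      apply List.map_congr_left
      intro ell hell
      have hellm : ell < m := List.mem_range.1 hell
      rw [← hkk, PySem.List.slice_natCast_add, pvInnerA_eq]
      unfold pvOut pvWval
      rw [← pvWin_eq_pvWinR ds kn ell (by omega)]
      have hmap : ((cs.drop ell).take kn).map pvDigit = (ds.drop ell).take kn := by
        simp [hds]
      rw [hmap]
      split <;> simp
    rw [hA]
    -- ===== B side =====
    obtain ⟨lb0, hst0, hlb0⟩ := pvInitInv ds kn
    have hinit : (PySem.List.pyRange 0 k 1).foldl (pvBInit ds) (0, -1)
        = (pvWsum (pvCl (pvWinR ds kn 0)), lb0) := by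
      rw [← hkk, PySem.List.pyRange_one]
      simp only [Int.sub_zero, Int.toNat_natCast, zero_add]
      rw [List.foldl_map, ← hst0]
      have hfeq : (fun (st : Int × Int) (i : Nat) => pvBInit ds st (i : Int)) = pvInitN ds := by
        funext st i
        simp [pvBInit, pvInitN]
      rw [hfeq]
    have hout0 : (if (0 : Int) ≤ lb0 then (-1 : Int) else pvWsum (pvCl (pvWinR ds kn 0)))
        = pvOut ds kn 0 := by
      have h := pvOutEq ds kn 0 lb0 (by simpa using hlb0)
      simpa using h
    obtain ⟨lb, hroll, _⟩ := pvRollInv ds kn hkn1 (m - 1)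
      (pvWsum (pvCl (pvWinR ds kn 0))) lb0 rfl hlb0
    have hfun : (fun (q : Int × Int × List Int) (t : Nat) => pvBStep ds k q (1 + (t : Int)))
        = (fun q t => pvStepN ds kn q (t + 1)) := by
      funext q t
      have hik : (1 : Int) + (t : Int) + k - 1 = ((t + kn : Nat) : Int) := by
        rw [← hkk]; push_cast; ring
      have hit : (1 : Int) + (t : Int) - 1 = ((t : Nat) : Int) := by omega
      have hnat : t + 1 + kn - 1 = t + kn := by omega
      have hnat1 : t + 1 - 1 = t := by omega
      have hpow : (k - 1).toNat = kn - 1 := by omega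
      have hc : ((t + 1 : Nat) : Int) = 1 + (t : Int) := by push_cast; ring
      simp only [pvBStep, pvStepN, hik, hit, hnat, hnat1, hpow, hc,
        PySem.List.pyGetD_natCast]
    have hrange : PySem.List.pyRange 1 ((n : Int) - k + 1) 1
        = (List.range (m - 1)).map (fun t : Nat => 1 + (t : Int)) := by
      have h1 : ((m : Int) - 1).toNat = m - 1 := by omega
      rw [hmInt, PySem.List.pyRange_one, h1]
    have hkey : (((List.range (m - 1)).map (fun t : Nat => 1 + (t : Int))).foldl (pvBStep ds k)
          (pvWsum (pvCl (pvWinR ds kn 0)), lb0, [pvOut ds kn 0])).2.2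
        = (List.range m).map (pvOut ds kn) := by
      rw [List.foldl_map]
      have hb : (fun (x : Int × Int × List Int) (y : Nat) => pvBStep ds k x (1 + (y : Int)))
          = (fun q t => pvStepN ds kn q (t + 1)) := hfun
      rw [hb, hroll]
      have hmm : m - 1 + 1 = m := by omega
      rw [hmm]
    simp only [hinit, hout0, hrange]
    rw [hkey]
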